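-- pv_equiv track=rewrite | github.com/MrPickle200/ChessEngine | GameManager.py | convert_idx_to_pos_for_UI
-- ===== SOURCE A (Python) =====
-- def convert_idx_to_pos_for_UI(idx:int) -> str:
--     table = {
--         "a1":0,
--         "b1":1,
--         "c1":2,
--         "d1":3,
--         "e1":4,
--         "f1":5,
--         "g1":6,
--         "h1":7
--             }
--
--     for i in range(2,9):
--         for char in ['a','b','c','d','e','f','g','h']:
--             table[char + str(i)] = table[char + str(i - 1)] + 8
--     for key, value in table.items():
--         if idx == value:
--             return key
-- ===== SOURCE B (Python) =====
-- def convert_idx_to_pos_for_UI(idx: int) -> str: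
--     if 0 <= idx < 64:
--         return chr(ord('a') + idx % 8) + str(idx // 8 + 1)
--     return None
-- ===== Notes on version B (the rewrite author's own statement) =====
-- stated objective: simpler
-- what changed: Replaces the loop-built 64-entry table and its linear scan with a direct closed-form computation of the file letter and rank digit from idx.
-- outside the precondition, e.g. on convert_idx_to_pos_for_UI(64): A returns None, B returns None
import Mathlib
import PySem

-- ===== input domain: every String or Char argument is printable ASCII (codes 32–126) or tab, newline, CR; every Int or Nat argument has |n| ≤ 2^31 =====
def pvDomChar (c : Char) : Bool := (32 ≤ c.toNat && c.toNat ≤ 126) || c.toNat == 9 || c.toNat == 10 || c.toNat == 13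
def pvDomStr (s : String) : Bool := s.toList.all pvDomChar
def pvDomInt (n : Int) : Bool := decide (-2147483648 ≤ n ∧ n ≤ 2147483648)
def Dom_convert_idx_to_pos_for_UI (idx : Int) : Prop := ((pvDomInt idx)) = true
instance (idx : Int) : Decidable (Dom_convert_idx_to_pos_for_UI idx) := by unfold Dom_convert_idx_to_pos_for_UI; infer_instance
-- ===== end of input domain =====

set_option maxRecDepth 4000


-- ===== PORT A =====
-- B replaces A's loop-built 64-entry table + linear scan with a closed-form
-- computation of file and rank (return-value equivalence on 0 <= idx < 64).
-- literal transliteration of A: build the rank-1 table, extend it rank by rank,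
-- then scan items for the first value equal to idx. Python's table[...] lookup
-- never misses here, so getD 0 is exact on every reached key.
def pvFiles : List String := ["a","b","c","d","e","f","g","h"]

def pvTableA : PySem.Dict String Int :=
  (PySem.List.pyRange 2 9 1).foldl (fun t i =>
    pvFiles.foldl (fun t ch =>
      t.insert (ch ++ PySem.Int.toStr i) (t.getD (ch ++ PySem.Int.toStr (i - 1)) 0 + 8)) t)
    (PySem.Dict.ofList [("a1",0),("b1",1),("c1",2),("d1",3),("e1",4),("f1",5),("g1",6),("h1",7)])

def convert_idx_to_pos_for_UI (idx : Int) : String :=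
  match pvTableA.items.find? (fun kv => idx == kv.2) with
  | some kv => kv.1
  | none => ""   -- Python falls through returning None here; excluded by Pre_

-- ===== PORT B =====
def convert_idx_to_pos_for_UI_alt (idx : Int) : String :=
  if 0 ≤ idx ∧ idx < 64 then
    String.ofList [Char.ofNat (97 + (PySem.Int.mod idx 8)).toNat] ++ PySem.Int.toStr (PySem.Int.floordiv idx 8 + 1)
  else ""   -- Python B returns None here; excluded by Pre_

-- ===== PRECONDITION & SPEC =====
-- Pre_ excludes idx outside 0..63, where A falls through and returns None, not a str.
def Pre_convert_idx_to_pos_for_UI (idx : Int) : Prop := 0 ≤ idx ∧ idx < 64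
instance (idx : Int) : Decidable (Pre_convert_idx_to_pos_for_UI idx) := by unfold Pre_convert_idx_to_pos_for_UI; infer_instance
def pvWitness_convert_idx_to_pos_for_UI : Int := 27

def Spec_convert_idx_to_pos_for_UI (idx : Int) (out : String) : Prop := out = convert_idx_to_pos_for_UI_alt idx
instance (idx : Int) (out : String) : Decidable (Spec_convert_idx_to_pos_for_UI idx out) := by unfold Spec_convert_idx_to_pos_for_UI; infer_instance

-- ===== CLAIM (what is proved, stated in full; the proofs are below) =====
def Claim_equal_convert_idx_to_pos_for_UI : Prop := ∀ (idx : Int), Dom_convert_idx_to_pos_for_UI idx → Pre_convert_idx_to_pos_for_UI idx → Spec_convert_idx_to_pos_for_UI idx (convert_idx_to_pos_for_UI idx)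

-- ===== LEMMAS AND PROOFS =====

-- ===== VERDICT (by name: the statement is the Claim_ definition above) =====
theorem convert_idx_to_pos_for_UI_spec : Claim_equal_convert_idx_to_pos_for_UI := by
  intro idx _ hpre
  unfold Spec_convert_idx_to_pos_for_UI
  obtain ⟨h0, h1⟩ := hpre
  interval_cases idx <;> decide
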